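-- pv_equiv track=rewrite | github.com/howisyour/automatic-octo-waffle | uva_10190.py | quite
-- ===== SOURCE A (Python) =====
-- def quite(n,m):
--     lst_mod = [n]
--     #lst_mod.append(n)
--     if n <=1 or m <= 1 :return 'Boring'
--     while n != 1:
--         if n % m !=0:return 'Boring'
--         n = n // m
--         lst_mod.append(n)
--         if n == 1:
--             return ' '.join(map(str,lst_mod))
--     if lst_mod[-1] in '1'!= True :return 'Boring!'
-- ===== SOURCE B (Python) =====
-- def quite(n, m):
--     if n <= 1 or m <= 1:
--         return 'Boring'
--     v = 1
--     lst = [1]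
--     while v < n:
--         v *= m
--         lst.append(v)
--     if v != n:
--         return 'Boring'
--     return ' '.join(str(x) for x in reversed(lst))
-- ===== Notes on version B (the rewrite author's own statement) =====
-- stated objective: alternative
-- what changed: B builds the sequence bottom-up by multiplying 1 by m until reaching n and validating by product equality, instead of A's top-down repeated division with a per-step divisibility test.
import Mathlib
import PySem

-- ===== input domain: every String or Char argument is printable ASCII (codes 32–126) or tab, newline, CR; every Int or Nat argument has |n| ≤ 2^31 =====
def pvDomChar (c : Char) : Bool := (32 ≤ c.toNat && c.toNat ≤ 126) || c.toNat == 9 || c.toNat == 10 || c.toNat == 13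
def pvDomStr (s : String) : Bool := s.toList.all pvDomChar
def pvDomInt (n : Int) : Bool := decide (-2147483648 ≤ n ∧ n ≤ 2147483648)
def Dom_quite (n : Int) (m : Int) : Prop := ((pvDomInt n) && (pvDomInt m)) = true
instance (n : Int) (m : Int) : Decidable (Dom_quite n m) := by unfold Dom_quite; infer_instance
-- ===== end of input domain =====

-- B rebuilds the sequence bottom-up (multiply 1 by m until reaching n, validate by product equality)
-- instead of A's top-down repeated division with a per-step divisibility test; objective: alternative.

-- ===== PORT A =====
-- A's while loop; fuel only makes the recursion total (n.toNat steps always suffice).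
def quiteLoopA (m : Int) (fuel : Nat) (n : Int) (lst : List Int) : String :=
  if n = 1 then "Boring!"  -- Python's dead line after the loop; unreachable from `quite` (the loop always returns)
  else if PySem.Int.mod n m ≠ 0 then "Boring"
  else
    let n' := PySem.Int.floordiv n m
    let lst' := lst ++ [n']
    if n' = 1 then PySem.Str.join " " (lst'.map PySem.Int.toStr)
    else
      match fuel with
      | 0 => "Boring"
      | f + 1 => quiteLoopA m f n' lst'

def quite (n : Int) (m : Int) : String :=
  let lst := [n]
  if n ≤ 1 ∨ m ≤ 1 then "Boring"
  else quiteLoopA m n.toNat n lst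

-- ===== PORT B =====
-- B's while loop; fuel only makes the recursion total (n.toNat steps always suffice).
def quiteLoopB (n m : Int) (fuel : Nat) (v : Int) (lst : List Int) : String :=
  if v < n then
    match fuel with
    | 0 => "Boring"
    | f + 1 => quiteLoopB n m f (v * m) (lst ++ [v * m])
  else if v ≠ n then "Boring"
  else PySem.Str.join " " (lst.reverse.map PySem.Int.toStr)

def quite_alt (n : Int) (m : Int) : String :=
  if n ≤ 1 ∨ m ≤ 1 then "Boring"
  else quiteLoopB n m n.toNat 1 [1]

-- ===== PRECONDITION & SPEC =====
def Spec_quite (n : Int) (m : Int) (out : String) : Prop := out = quite_alt n m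
instance (n : Int) (m : Int) (out : String) : Decidable (Spec_quite n m out) := by unfold Spec_quite; infer_instance

-- ===== CLAIM (what is proved, stated in full; the proofs are below) =====
def Claim_equal_quite : Prop := ∀ (n : Int) (m : Int), Dom_quite n m → Spec_quite n m (quite n m)

-- ===== LEMMAS AND PROOFS =====

-- ascending powers m^(j+1), …, m^(j+d)
def ascL (m : Int) : Nat → Nat → List Int
  | _, 0 => []
  | j, d + 1 => m ^ (j + 1) :: ascL m (j + 1) d
termination_by _j d => d

theorem ascL_snoc (m : Int) (j d : Nat) :
    ascL m j (d + 1) = ascL m j d ++ [m ^ (j + d + 1)] := by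
  induction d generalizing j with
  | zero => simp [ascL]
  | succ d ih =>
    rw [ascL, ih (j + 1), ascL]
    simp [List.cons_append]
    congr 2
    omega

theorem down_succ (m : Int) (k : Nat) :
    (1 :: ascL m 0 (k + 1)).reverse = m ^ (k + 1) :: (1 :: ascL m 0 k).reverse := by
  rw [ascL_snoc]
  simp

theorem mod_pow_succ (m : Int) (_hm : 2 ≤ m) (k : Nat) : PySem.Int.mod (m ^ (k + 1)) m = 0 := by
  exact (PySem.Int.mod_eq_zero_iff_dvd _ _).mpr ⟨m ^ k, by ring⟩

theorem floordiv_pow_succ (m : Int) (hm : 2 ≤ m) (k : Nat) :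
    PySem.Int.floordiv (m ^ (k + 1)) m = m ^ k := by
  rw [PySem.Int.floordiv_eq_ediv_of_pos (by omega), pow_succ]
  exact Int.mul_ediv_cancel _ (by omega)

theorem pow_succ_ne_one (m : Int) (hm : 2 ≤ m) (k : Nat) : m ^ (k + 1) ≠ 1 := by
  have h2 : (2 : Int) ^ (k + 1) ≤ m ^ (k + 1) := pow_le_pow_left₀ (by norm_num) hm _
  have h3 : (2 : Int) ≤ 2 ^ (k + 1) := by
    calc (2 : Int) = 2 ^ 1 := by norm_num
    _ ≤ 2 ^ (k + 1) := pow_le_pow_right₀ (by norm_num) (by omega)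
  omega

-- A's loop on an exact power: it emits lst followed by m^k, …, m, 1.
theorem loopA_pow (m : Int) (hm : 2 ≤ m) (k : Nat) :
    ∀ fuel lst, k ≤ fuel →
      quiteLoopA m fuel (m ^ (k + 1)) lst =
        PySem.Str.join " " ((lst ++ (1 :: ascL m 0 k).reverse).map PySem.Int.toStr) := by
  induction k with
  | zero =>
    intro fuel lst _
    rw [quiteLoopA, if_neg (pow_succ_ne_one m hm 0)]
    have hmod : PySem.Int.mod m m = 0 := by simpa using mod_pow_succ m hm 0
    have hdiv : PySem.Int.floordiv m m = 1 := by simpa using floordiv_pow_succ m hm 0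
    simp [hmod, hdiv, ascL]
  | succ k ih =>
    intro fuel lst hfuel
    obtain ⟨f, rfl⟩ : ∃ f, fuel = f + 1 := ⟨fuel - 1, by omega⟩
    rw [quiteLoopA]
    simp only [if_neg (pow_succ_ne_one m hm (k + 1)), mod_pow_succ m hm (k + 1),
      ne_eq, not_true_eq_false, if_false, floordiv_pow_succ m hm (k + 1),
      if_neg (pow_succ_ne_one m hm k)]
    rw [ih f (lst ++ [m ^ (k + 1)]) (by omega), down_succ]
    simp

-- A's loop on a non-power: "Boring".
theorem loopA_nonpow (m : Int) (hm : 2 ≤ m) :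
    ∀ fuel n lst, 2 ≤ n → (∀ k : Nat, m ^ k ≠ n) → quiteLoopA m fuel n lst = "Boring" := by
  intro fuel
  induction fuel with
  | zero =>
    intro n lst hn hnp
    rw [quiteLoopA]
    rw [if_neg (by omega : ¬ n = 1)]
    by_cases hmod : PySem.Int.mod n m = 0
    · have hdm : PySem.Int.floordiv n m * m = n := by
        have := PySem.Int.floordiv_mul_add_mod n m
        omega
      have hne1 : PySem.Int.floordiv n m ≠ 1 := by
        intro h1
        rw [h1, one_mul] at hdm
        exact hnp 1 (by rw [pow_one]; exact hdm)
      simp [hmod, hne1]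
    · simp [hmod]
  | succ f ih =>
    intro n lst hn hnp
    rw [quiteLoopA]
    rw [if_neg (by omega : ¬ n = 1)]
    by_cases hmod : PySem.Int.mod n m = 0
    · have hdm : PySem.Int.floordiv n m * m = n := by
        have := PySem.Int.floordiv_mul_add_mod n m
        omega
      set c := PySem.Int.floordiv n m with hc
      have hne1 : c ≠ 1 := by
        intro h1
        rw [h1, one_mul] at hdm
        exact hnp 1 (by rw [pow_one]; exact hdm)
      have hcpos : 1 ≤ c := by nlinarith
      have hc2 : 2 ≤ c := by omega
      have hcp : ∀ k : Nat, m ^ k ≠ c := by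
        intro k hk
        exact hnp (k + 1) (by rw [pow_succ, hk]; omega)
      simp only [hmod, ne_eq, not_true_eq_false, if_false, if_neg hne1]
      exact ih c (lst ++ [c]) hc2 hcp
    · simp [hmod]

-- B's loop from m^j up to m^(j+d): it accumulates the ascending powers and joins the reverse.
theorem loopB_pow (m : Int) (hm : 2 ≤ m) (d : Nat) :
    ∀ fuel j lst, d ≤ fuel →
      quiteLoopB (m ^ (j + d)) m fuel (m ^ j) lst =
        PySem.Str.join " " ((lst ++ ascL m j d).reverse.map PySem.Int.toStr) := by
  induction d with
  | zero =>
    intro fuel j lst _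
    rw [quiteLoopB.eq_def]
    simp [ascL]
  | succ d ih =>
    intro fuel j lst hfuel
    obtain ⟨f, rfl⟩ : ∃ f, fuel = f + 1 := ⟨fuel - 1, by omega⟩
    have hlt : m ^ j < m ^ (j + (d + 1)) := pow_lt_pow_right₀ (by omega) (by omega)
    rw [quiteLoopB.eq_def, if_pos hlt]
    show quiteLoopB (m ^ (j + (d + 1))) m f (m ^ j * m) (lst ++ [m ^ j * m]) = _
    have hstep : m ^ j * m = m ^ (j + 1) := (pow_succ m j).symm
    have harg : j + (d + 1) = (j + 1) + d := by omega
    rw [hstep, harg, ih f (j + 1) (lst ++ [m ^ (j + 1)]) (by omega)]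
    rw [ascL]
    simp

-- B's loop when n is not a power of m: the product overshoots and "Boring" results.
theorem loopB_nonpow (n m : Int) (_hm : 2 ≤ m) (_hn : 2 ≤ n) (hnp : ∀ k : Nat, m ^ k ≠ n) :
    ∀ fuel j lst, quiteLoopB n m fuel (m ^ j) lst = "Boring" := by
  intro fuel
  induction fuel with
  | zero =>
    intro j lst
    rw [quiteLoopB]
    by_cases hlt : m ^ j < n
    · simp [hlt]
    · simp [hlt, hnp j]
  | succ f ih =>
    intro j lst
    rw [quiteLoopB]
    by_cases hlt : m ^ j < n
    · rw [if_pos hlt]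
      have hstep : m ^ j * m = m ^ (j + 1) := (pow_succ m j).symm
      rw [hstep]
      exact ih (j + 1) (lst ++ [m ^ (j + 1)])
    · simp [hlt, hnp j]

theorem exp_lt_toNat (m : Int) (hm : 2 ≤ m) (k : Nat) : k + 1 ≤ (m ^ (k + 1)).toNat := by
  have h2 : (2 : Int) ^ (k + 1) ≤ m ^ (k + 1) := pow_le_pow_left₀ (by norm_num) hm _
  have h3 : (k + 1 : Nat) < 2 ^ (k + 1) := Nat.lt_two_pow_self
  have h4 : ((k + 1 : Nat) : Int) < ((2 ^ (k + 1) : Nat) : Int) := by exact_mod_cast h3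
  have h5 : ((2 ^ (k + 1) : Nat) : Int) = (2 : Int) ^ (k + 1) := by push_cast; ring
  omega

-- ===== VERDICT (by name: the statement is the Claim_ definition above) =====
theorem quite_spec : Claim_equal_quite := by
  intro n m _
  unfold Spec_quite quite quite_alt
  by_cases hg : n ≤ 1 ∨ m ≤ 1
  · simp [hg]
  · push_neg at hg
    obtain ⟨hn, hm⟩ := hg
    rw [if_neg (by omega), if_neg (by omega)]
    by_cases hp : ∃ k : Nat, m ^ k = n
    · obtain ⟨k, hk⟩ := hp
      obtain ⟨k, rfl⟩ : ∃ k', k = k' + 1 := by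
        refine ⟨k - 1, ?_⟩
        rcases k with _ | k
        · simp at hk; omega
        · omega
      have hbound := exp_lt_toNat m (by omega) k
      subst hk
      rw [loopA_pow m (by omega) k _ _ (by omega)]
      have hb := loopB_pow m (by omega) (k + 1) ((m ^ (k + 1)).toNat) 0 [1] (by omega)
      simp only [Nat.zero_add, pow_zero] at hb
      rw [hb]
      rw [show ([1] ++ ascL m 0 (k + 1) : List Int) = 1 :: ascL m 0 (k + 1) from rfl, down_succ]
      simp
    · push_neg at hp
      rw [loopA_nonpow m (by omega) _ _ _ (by omega) hp]
      have hb := loopB_nonpow n m (by omega) (by omega) hp n.toNat 0 [1]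
      simp only [pow_zero] at hb
      rw [hb]
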